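-- pv_equiv track=rewrite | github.com/ant0x00/algorithm | 747_dominantIndex.py | dominantIndex2
-- ===== SOURCE A (Python) =====
-- def dominantIndex2(nums):
--     #优化解决
--     if not nums:
--         return -1
--     maxn = max(nums)
--     for item in nums:
--         if maxn < 2 * item and maxn != item:
--             return -1
--     return nums.index(maxn)
-- ===== SOURCE B (Python) =====
-- def dominantIndex2(nums):
--     if not nums:
--         return -1
--     s = sorted(nums)
--     top = s[-1]
--     i = len(s) - 2
--     while i >= 0 and s[i] == top:
--         i -= 1
--     if i >= 0 and top < 2 * s[i]:
--         return -1
--     return nums.index(top)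
-- ===== Notes on version B (the rewrite author's own statement) =====
-- stated objective: alternative
-- what changed: Sorts the list and scans backwards from the end to find the second distinct maximum, replacing A's per-element guarded loop over the unsorted list with a sort-then-scan on the sorted order.
import Mathlib
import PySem

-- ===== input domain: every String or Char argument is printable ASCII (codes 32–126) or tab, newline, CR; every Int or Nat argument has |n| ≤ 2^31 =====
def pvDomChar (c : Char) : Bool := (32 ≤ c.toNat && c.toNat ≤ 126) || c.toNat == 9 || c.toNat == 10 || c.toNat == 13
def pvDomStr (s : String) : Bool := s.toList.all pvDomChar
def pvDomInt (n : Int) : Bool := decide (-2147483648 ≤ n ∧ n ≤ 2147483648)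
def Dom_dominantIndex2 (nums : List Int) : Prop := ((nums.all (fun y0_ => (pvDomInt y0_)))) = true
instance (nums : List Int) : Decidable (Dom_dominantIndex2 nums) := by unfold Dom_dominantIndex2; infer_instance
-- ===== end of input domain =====

-- B sorts the list and scans backwards for the second distinct maximum instead of A's
-- per-element guarded loop over the unsorted list; alternative decomposition, same result.

-- ===== PORT A =====
-- the for-loop of A: early-return -1 on a violating item, else nums.index(maxn)
def pvALoop (maxn : Int) (full : List Int) : List Int → Int
  | [] =>
      -- nums.index(maxn); maxn = max(nums) ∈ nums, so the none branch is unreachable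
      match PySem.List.index? full maxn with
      | some i => (i : Int)
      | none => -1
  | x :: xs => if maxn < 2 * x ∧ maxn ≠ x then -1 else pvALoop maxn full xs

def dominantIndex2 (nums : List Int) : Int :=
  if nums = [] then -1
  else
    match PySem.List.max? nums (fun y => y) with
    | none => -1   -- unreachable: nums ≠ []
    | some maxn => pvALoop maxn nums nums

-- ===== PORT B =====
-- the while-loop of B: i runs down from len(s)-2 skipping entries equal to top;
-- argument n stands for i+1 (so n = 0 is the exited state i = -1)
def pvScan (s : List Int) (top : Int) : Nat → Int
  | 0 => -1
  | n + 1 => if s.getD n 0 = top then pvScan s top n else (n : Int)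

def dominantIndex2_alt (nums : List Int) : Int :=
  if nums = [] then -1
  else
    let s := PySem.List.sorted nums (fun x => x) false
    match PySem.List.pyGet? s (-1) with      -- top = s[-1]
    | none => -1   -- unreachable: s ≠ []
    | some top =>
      let i := pvScan s top (s.length - 1)
      if 0 ≤ i ∧ top < 2 * PySem.List.pyGetD s i 0 then -1
      else
        match PySem.List.index? nums top with  -- nums.index(top); top ∈ nums
        | some k => (k : Int)
        | none => -1   -- unreachable

-- ===== PRECONDITION & SPEC =====
def Spec_dominantIndex2 (nums : List Int) (out : Int) : Prop := out = dominantIndex2_alt nums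
instance (nums : List Int) (out : Int) : Decidable (Spec_dominantIndex2 nums out) := by unfold Spec_dominantIndex2; infer_instance

-- ===== CLAIM (what is proved, stated in full; the proofs are below) =====
def Claim_equal_dominantIndex2 : Prop := ∀ (nums : List Int), Dom_dominantIndex2 nums → Spec_dominantIndex2 nums (dominantIndex2 nums)

-- ===== LEMMAS AND PROOFS =====

lemma pvALoop_eq (maxn : Int) (full : List Int) (l : List Int) :
    pvALoop maxn full l =
      if ∃ x ∈ l, maxn < 2 * x ∧ maxn ≠ x then -1
      else
        match PySem.List.index? full maxn with
        | some i => (i : Int)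
        | none => -1 := by
  induction l with
  | nil => simp [pvALoop]
  | cons x xs ih =>
    by_cases h : maxn < 2 * x ∧ maxn ≠ x
    · simp [pvALoop, h]
    · simp only [pvALoop, if_neg h, ih]
      congr 1
      simp only [List.mem_cons, eq_iff_iff]
      constructor
      · rintro ⟨y, hy, hc⟩; exact ⟨y, Or.inr hy, hc⟩
      · rintro ⟨y, hy, hc⟩
        rcases hy with rfl | hy
        · exact absurd hc h
        · exact ⟨y, hy, hc⟩

-- the exit state of B's while-loop: either every scanned entry equals top (i = -1),
-- or i is the greatest index below n whose entry differs from top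
lemma pvScan_spec (s : List Int) (top : Int) (n : Nat) :
    (pvScan s top n = -1 ∧ ∀ j, j < n → s.getD j 0 = top) ∨
    (∃ k : Nat, pvScan s top n = (k : Int) ∧ k < n ∧ s.getD k 0 ≠ top ∧
      ∀ j, k < j → j < n → s.getD j 0 = top) := by
  induction n with
  | zero => exact Or.inl ⟨rfl, fun j hj => absurd hj (Nat.not_lt_zero j)⟩
  | succ n ih =>
    by_cases h : s.getD n 0 = top
    · rcases ih with ⟨h1, h2⟩ | ⟨k, h1, h2, h3, h4⟩
      · refine Or.inl ⟨by simp only [pvScan, if_pos h, h1], fun j hj => ?_⟩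
        rcases Nat.lt_succ_iff_lt_or_eq.1 hj with hj' | rfl
        · exact h2 j hj'
        · exact h
      · refine Or.inr ⟨k, by simp only [pvScan, if_pos h, h1], by omega, h3, fun j hk hj => ?_⟩
        rcases (by omega : j < n ∨ j = n) with hj' | rfl
        · exact h4 j hk hj'
        · exact h
    · exact Or.inr ⟨n, by simp only [pvScan, if_neg h], Nat.lt_succ_self n, h,
        fun j hk hj => by omega⟩

-- ===== VERDICT (by name: the statement is the Claim_ definition above) =====
theorem dominantIndex2_spec : Claim_equal_dominantIndex2 := by
  intro nums _
  unfold Spec_dominantIndex2 dominantIndex2 dominantIndex2_alt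
  by_cases hnil : nums = []
  · simp [hnil]
  simp only [if_neg hnil]
  set s := PySem.List.sorted nums (fun x => x) false with hs
  have hperm : s.Perm nums := PySem.List.sorted_perm nums (fun x => x) false
  have hsne : s ≠ [] := by
    intro h
    have hl := hperm.length_eq
    rw [h] at hl
    exact hnil (List.eq_nil_of_length_eq_zero hl.symm)
  have hlen : 0 < s.length := List.length_pos_iff.2 hsne
  cases hmax : PySem.List.max? nums (fun y => y) with
  | none => exact absurd ((PySem.List.max?_eq_none_iff _ _).1 hmax) hnil
  | some maxn =>
    have hmaxmem : maxn ∈ nums := PySem.List.max?_mem hmax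
    have hmaxmax : ∀ y ∈ nums, y ≤ maxn := PySem.List.max?_isMax hmax
    rw [PySem.List.pyGet?_neg_one, List.getLast?_eq_some_getLast hsne]
    set top := s.getLast hsne with htopdef
    have htopidx : top = s[s.length - 1]'(by omega) := List.getLast_eq_getElem hsne
    have hmono : ∀ (p q : Nat) (hpq : p ≤ q) (hq : q < s.length),
        s[p]'(Nat.lt_of_le_of_lt hpq hq) ≤ s[q]'hq := by
      intro p q hpq hq
      exact PySem.List.sorted_id_getElem_mono nums hpq (hs ▸ hq)
    have htopmem : top ∈ nums := hperm.mem_iff.mp (htopidx ▸ List.getElem_mem _)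
    have htopmax : ∀ y ∈ s, y ≤ top := by
      intro y hy
      obtain ⟨j, hj, rfl⟩ := List.mem_iff_getElem.mp hy
      rw [htopidx]
      exact hmono j (s.length - 1) (by omega) (by omega)
    have htop : top = maxn :=
      le_antisymm (hmaxmax top htopmem) (htopmax maxn (hperm.mem_iff.mpr hmaxmem))
    have hgetD : ∀ j : Nat, (hj : j < s.length) → s.getD j 0 = s[j]'hj := by
      intro j hj; exact List.getD_eq_getElem s 0 hj
    simp only [pvALoop_eq]
    rcases pvScan_spec s top (s.length - 1) with ⟨h1, h2⟩ | ⟨k, h1, hk, hkne, hktop⟩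
    · -- i = -1: every element of s equals top, so A's existential is false
      have hall : ∀ x ∈ nums, x = top := by
        intro x hx
        obtain ⟨j, hj, rfl⟩ := List.mem_iff_getElem.mp (hperm.mem_iff.mpr hx)
        rcases (by omega : j < s.length - 1 ∨ j = s.length - 1) with hj' | rfl
        · rw [← hgetD j hj]; exact h2 j hj'
        · exact htopidx.symm
      have hnoex : ¬ ∃ x ∈ nums, maxn < 2 * x ∧ maxn ≠ x := by
        rintro ⟨x, hx, _, hne⟩
        exact hne ((hall x hx).symm ▸ htop.symm)
      rw [if_neg hnoex, h1]
      have : ¬ ((0:Int) ≤ -1 ∧ top < 2 * PySem.List.pyGetD s (-1) 0) := by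
        rintro ⟨h, _⟩; omega
      rw [if_neg this, htop]
    · -- i = k ≥ 0: s[k] is the largest value distinct from top
      rw [h1]
      have hklen : k < s.length := by omega
      have hgd : PySem.List.pyGetD s ((k : Nat) : Int) 0 = s.getD k 0 :=
        PySem.List.pyGetD_natCast s k 0
      set m := s.getD k 0 with hm
      have hmmem : m ∈ nums := by
        rw [hm, hgetD k hklen]
        exact hperm.mem_iff.mp (List.getElem_mem _)
      have hiff : (∃ x ∈ nums, maxn < 2 * x ∧ maxn ≠ x) ↔ top < 2 * m := by
        constructor
        · rintro ⟨x, hx, hlt, hne⟩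
          obtain ⟨j, hj, rfl⟩ := List.mem_iff_getElem.mp (hperm.mem_iff.mpr hx)
          have hjne : s[j] ≠ top := fun h => hne (h ▸ htop.symm)
          have hjk : j ≤ k := by
            by_contra hgt
            rcases (by omega : j < s.length - 1 ∨ j = s.length - 1) with hj' | rfl
            · exact hjne (hgetD j hj ▸ hktop j (by omega) hj')
            · exact hjne htopidx.symm
          have : s[j] ≤ m := by
            rw [hm, hgetD k hklen]; exact hmono j k hjk hklen
          omega
        · intro hlt
          exact ⟨m, hmmem, by rw [← htop]; exact hlt, fun h => hkne (by rw [← h, ← htop])⟩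
      by_cases hlt : top < 2 * m
      · rw [if_pos (hiff.mpr hlt), if_pos ⟨by positivity, by rw [hgd]; exact hlt⟩]
      · rw [if_neg (fun h => hlt (hiff.mp h)),
          if_neg (by rintro ⟨_, h⟩; rw [hgd] at h; exact hlt h), htop]
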